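-- pv_equiv track=rewrite | github.com/YegorDB/THPoker | thpoker/hardcore.py | sort_rcards
-- ===== SOURCE A (Python) =====
-- def sort_rcards(rcards, cards):
--     result = cards[:]
--
--     for c in filter(lambda c: c // 1000, rcards):
--         try:
--             result[result.index(c % 1000)] = c
--         except ValueError:
--             pass
--
--     return result
-- ===== SOURCE B (Python) =====
-- def sort_rcards(rcards, cards):
--     queues = {}
--     for c in rcards:
--         if c // 1000:
--             queues.setdefault(c % 1000, []).append(c)
--     result = []
--     for v in cards:
--         q = queues.get(v)
--         if q:
--             result.append(q.pop(0))
--         else: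
--             result.append(v)
--     return result
-- ===== Notes on version B (the rewrite author's own statement) =====
-- stated objective: faster
-- what changed: A repeatedly scans the result list with result.index for each filtered rcard; B builds a dict of per-base-value FIFO queues from rcards once and then makes a single pass over cards, popping the front of the matching queue at each position.
import Mathlib
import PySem

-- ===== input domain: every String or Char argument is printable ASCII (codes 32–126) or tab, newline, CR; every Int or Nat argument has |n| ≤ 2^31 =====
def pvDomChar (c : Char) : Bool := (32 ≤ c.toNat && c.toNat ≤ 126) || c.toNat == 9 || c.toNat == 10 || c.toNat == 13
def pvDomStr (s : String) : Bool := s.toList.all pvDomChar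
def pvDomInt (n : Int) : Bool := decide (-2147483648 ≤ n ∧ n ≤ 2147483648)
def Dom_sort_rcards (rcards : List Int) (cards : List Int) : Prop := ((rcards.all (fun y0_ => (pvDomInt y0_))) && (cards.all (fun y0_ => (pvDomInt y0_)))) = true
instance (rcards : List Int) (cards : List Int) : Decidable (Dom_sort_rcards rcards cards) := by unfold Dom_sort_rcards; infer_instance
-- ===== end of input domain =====

-- B replaces A's repeated result.index scans with a dict of per-value FIFO queues and a single
-- pass over cards (objective: faster); return value only — neither implementation mutates its arguments.

-- ===== PORT A =====
def sort_rcards (rcards : List Int) (cards : List Int) : List Int :=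
  (rcards.filter (fun c => PySem.Int.floordiv c 1000 != 0)).foldl
    (fun result c =>
      match PySem.List.index? result (PySem.Int.mod c 1000) with
      | some i => result.set i c
      | none => result)
    cards

-- ===== PORT B =====
-- first loop of Source B: queues.setdefault(c % 1000, []).append(c) for the filtered rcards
def buildQueues (rcards : List Int) : PySem.Dict Int (List Int) :=
  rcards.foldl (fun d c =>
    if PySem.Int.floordiv c 1000 != 0 then
      d.modify (PySem.Int.mod c 1000) [] (fun q => q ++ [c])
    else d) PySem.Dict.empty

def sort_rcards_alt (rcards : List Int) (cards : List Int) : List Int :=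
  (cards.foldl (fun (st : PySem.Dict Int (List Int) × List Int) v =>
      match PySem.Dict.get? st.1 v with
      | some (c :: rest) => (st.1.insert v rest, st.2 ++ [c])
      | _ => (st.1, st.2 ++ [v]))
    (buildQueues rcards, [])).2

-- ===== PRECONDITION & SPEC =====
def Spec_sort_rcards (rcards : List Int) (cards : List Int) (out : List Int) : Prop := out = sort_rcards_alt rcards cards
instance (rcards : List Int) (cards : List Int) (out : List Int) : Decidable (Spec_sort_rcards rcards cards out) := by unfold Spec_sort_rcards; infer_instance

-- ===== CLAIM (what is proved, stated in full; the proofs are below) =====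
def Claim_equal_sort_rcards : Prop := ∀ (rcards : List Int) (cards : List Int), Dom_sort_rcards rcards cards → Spec_sort_rcards rcards cards (sort_rcards rcards cards)

-- ===== LEMMAS AND PROOFS =====

-- replace the first occurrence of v in the list by c (what A's index/set pair does)
def replFirst (v c : Int) : List Int → List Int
  | [] => []
  | x :: xs => if x = v then c :: xs else x :: replFirst v c xs

-- A's loop body, named
def stepA (result : List Int) (c : Int) : List Int :=
  match PySem.List.index? result (PySem.Int.mod c 1000) with
  | some i => result.set i c
  | none => result

-- B's second loop, as a structural recursion over cards
def passRec (d : PySem.Dict Int (List Int)) : List Int → List Int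
  | [] => []
  | v :: vs =>
    match PySem.Dict.get? d v with
    | some (c :: rest) => c :: passRec (d.insert v rest) vs
    | _ => v :: passRec d vs

lemma stepA_eq_repl (xs : List Int) (c : Int) :
    stepA xs c = replFirst (PySem.Int.mod c 1000) c xs := by
  induction xs with
  | nil => rfl
  | cons x xs ih =>
    by_cases hx : x = PySem.Int.mod c 1000
    · subst hx
      rw [stepA, PySem.List.index?_cons_self]
      simp [replFirst]
    · rw [stepA, PySem.List.index?_cons_of_ne xs hx, replFirst, if_neg hx]
      rw [stepA] at ih
      cases h : PySem.List.index? xs (PySem.Int.mod c 1000) with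
      | none => rw [h] at ih; simpa using ih
      | some i => rw [h] at ih; simpa using ih

-- an element that passes A's filter is never equal to any search key c % 1000
lemma enriched_ne_mod {f : Int} (h : (PySem.Int.floordiv f 1000 != 0) = true) (g : Int) :
    f ≠ PySem.Int.mod g 1000 := by
  intro hf
  have h0 := PySem.Int.mod_nonneg g (b := 1000) (by norm_num)
  have h1 := PySem.Int.mod_lt g (b := 1000) (by norm_num)
  rw [← hf] at h0 h1
  have hz : PySem.Int.floordiv f 1000 = 0 :=
    (PySem.Int.floordiv_eq_iff_of_pos (by norm_num)).2 ⟨by omega, by omega⟩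
  exact (bne_iff_ne.mp h) hz

-- folding A's step over c :: xs with c never matched just carries c along
lemma foldl_repl_cons (c : Int) :
    ∀ (fs : List Int), (∀ f ∈ fs, c ≠ PySem.Int.mod f 1000) →
    ∀ xs, fs.foldl (fun r f => replFirst (PySem.Int.mod f 1000) f r) (c :: xs)
      = c :: fs.foldl (fun r f => replFirst (PySem.Int.mod f 1000) f r) xs := by
  intro fs
  induction fs with
  | nil => intro _ xs; simp
  | cons f fs ih =>
    intro hc xs
    have hne : c ≠ PySem.Int.mod f 1000 := hc f (by simp)
    simp only [List.foldl_cons, replFirst, if_neg hne]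
    exact ih (fun g hg => hc g (by simp [hg])) _

lemma foldl_repl_nil (fs : List Int) :
    fs.foldl (fun r f => replFirst (PySem.Int.mod f 1000) f r) [] = [] := by
  induction fs with
  | nil => rfl
  | cons f fs ih => simpa [replFirst] using ih

-- A's fold on v :: xs, characterised by the first matching filtered rcard
lemma foldl_repl_head (v : Int) :
    ∀ (fs : List Int), (∀ f ∈ fs, (PySem.Int.floordiv f 1000 != 0) = true) →
    ∀ xs, fs.foldl (fun r f => replFirst (PySem.Int.mod f 1000) f r) (v :: xs)
      = match fs.find? (fun f => PySem.Int.mod f 1000 == v) with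
        | some f => f :: (fs.eraseP (fun f => PySem.Int.mod f 1000 == v)).foldl
            (fun r f => replFirst (PySem.Int.mod f 1000) f r) xs
        | none => v :: fs.foldl (fun r f => replFirst (PySem.Int.mod f 1000) f r) xs := by
  intro fs
  induction fs with
  | nil => intro _ xs; simp
  | cons f fs ih =>
    intro hfs xs
    have hf := hfs f (by simp)
    have hfs' : ∀ g ∈ fs, (PySem.Int.floordiv g 1000 != 0) = true :=
      fun g hg => hfs g (by simp [hg])
    by_cases hm : PySem.Int.mod f 1000 = v
    · simp only [List.foldl_cons, replFirst, if_pos hm.symm]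
      rw [foldl_repl_cons f fs (fun g _ => enriched_ne_mod hf g)]
      have hp : (PySem.Int.mod f 1000 == v) = true := beq_iff_eq.mpr hm
      rw [List.find?_cons_of_pos (p := fun f => PySem.Int.mod f 1000 == v) hp,
        List.eraseP_cons_of_pos (p := fun f => PySem.Int.mod f 1000 == v) hp]
    · have hv : v ≠ PySem.Int.mod f 1000 := fun h => hm h.symm
      have hp : ¬ (PySem.Int.mod f 1000 == v) = true := by simpa using hm
      simp only [List.foldl_cons, replFirst, if_neg hv]
      rw [ih hfs' (replFirst (PySem.Int.mod f 1000) f xs)]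
      rw [List.find?_cons_of_neg (p := fun f => PySem.Int.mod f 1000 == v) hp,
        List.eraseP_cons_of_neg (p := fun f => PySem.Int.mod f 1000 == v) (by simpa using hp)]
      cases h : List.find? (fun f => PySem.Int.mod f 1000 == v) fs with
      | none => simp
      | some g => simp

-- erasing the first element matching one key leaves the sublists for other keys intact
lemma filter_eraseP_ne (p q : Int → Bool) (hdisj : ∀ x, p x = true → q x = false) :
    ∀ l : List Int, (l.eraseP p).filter q = l.filter q := by
  intro l
  induction l with
  | nil => rfl
  | cons x xs ih =>
    by_cases hp : p x = true
    · rw [List.eraseP_cons_of_pos hp]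
      simp [hdisj x hp]
    · rw [List.eraseP_cons_of_neg (by simpa using hp)]
      simp [List.filter_cons, ih]

lemma find?_filter_cons (p : Int → Bool) :
    ∀ (l : List Int) (f : Int), l.find? p = some f →
      l.filter p = f :: (l.eraseP p).filter p := by
  intro l
  induction l with
  | nil => intro f h; simp at h
  | cons x xs ih =>
    intro f h
    by_cases hp : p x = true
    · rw [List.find?_cons_of_pos hp] at h
      injection h with h; subst h
      rw [List.eraseP_cons_of_pos hp, List.filter_cons_of_pos hp]
    · rw [List.find?_cons_of_neg (by simpa using hp)] at h
      rw [List.eraseP_cons_of_neg (by simpa using hp),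
        List.filter_cons_of_neg (by simpa using hp),
        List.filter_cons_of_neg (by simpa using hp)]
      exact ih f h

-- main invariant: if every per-value queue of d is the matching sublist of fs,
-- B's pass over cards computes A's fold of fs over cards
lemma pass_eq_fold (cards : List Int) :
    ∀ (fs : List Int) (d : PySem.Dict Int (List Int)),
      (∀ f ∈ fs, (PySem.Int.floordiv f 1000 != 0) = true) →
      (∀ v, (PySem.Dict.get? d v).getD [] = fs.filter (fun f => PySem.Int.mod f 1000 == v)) →
      passRec d cards = fs.foldl (fun r f => replFirst (PySem.Int.mod f 1000) f r) cards := by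
  induction cards with
  | nil => intro fs d _ _; rw [foldl_repl_nil]; rfl
  | cons v vs ih =>
    intro fs d henr hinv
    rw [foldl_repl_head v fs henr vs]
    have hv := hinv v
    cases hfind : List.find? (fun f => PySem.Int.mod f 1000 == v) fs with
    | none =>
      have hfil : fs.filter (fun f => PySem.Int.mod f 1000 == v) = [] := by
        rw [List.filter_eq_nil_iff]
        exact fun a ha => List.find?_eq_none.mp hfind a ha
      rw [hfil] at hv
      rw [passRec]
      cases hget : PySem.Dict.get? d v with
      | none => exact congrArg (v :: ·) (ih fs d henr hinv)
      | some q =>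
        rw [hget] at hv
        cases q with
        | nil => exact congrArg (v :: ·) (ih fs d henr hinv)
        | cons c rest => simp at hv
    | some f =>
      have hfil := find?_filter_cons _ fs f hfind
      rw [hfil] at hv
      cases hget : PySem.Dict.get? d v with
      | none => rw [hget] at hv; simp at hv
      | some q =>
        rw [hget] at hv
        simp only [Option.getD_some] at hv
        rw [passRec]
        simp only [hget, hv]
        apply congrArg (f :: ·)
        apply ih (fs.eraseP (fun f => PySem.Int.mod f 1000 == v)) _
        · exact fun g hg => henr g (List.mem_of_mem_eraseP hg)
        · intro w
          by_cases hw : w = v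
          · subst hw
            rw [PySem.Dict.get?_insert_self]
            rfl
          · rw [PySem.Dict.get?_insert_of_ne d _ hw, hinv w]
            have hdis : ∀ x, (PySem.Int.mod x 1000 == v) = true →
                (PySem.Int.mod x 1000 == w) = false := by
              intro x hx
              have hxv : PySem.Int.mod x 1000 = v := beq_iff_eq.mp hx
              rw [beq_eq_false_iff_ne, hxv]
              exact fun h => hw h.symm
            rw [filter_eraseP_ne _ _ hdis fs]

-- the built dict's queue at v is exactly the matching sublist of the filtered rcards
lemma build_getD (rcards : List Int) (v : Int) :
    (PySem.Dict.get? (buildQueues rcards) v).getD []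
    = (rcards.filter (fun c => PySem.Int.floordiv c 1000 != 0)).filter
        (fun f => PySem.Int.mod f 1000 == v) := by
  rw [← PySem.Dict.getD_eq_get?_getD]
  rw [buildQueues, PySem.List.foldl_if_eq_foldl_filter
    (p := fun c => PySem.Int.floordiv c 1000 != 0)
    (f := fun d c => PySem.Dict.modify d (PySem.Int.mod c 1000) [] (fun q => q ++ [c]))]
  have h := PySem.Dict.getD_foldl_modify_append
    ((rcards.filter (fun c => PySem.Int.floordiv c 1000 != 0)).map
      (fun c => (PySem.Int.mod c 1000, c)))
    (PySem.Dict.empty) v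
  rw [List.foldl_map] at h
  rw [h]
  simp [List.filter_map, Function.comp_def]

-- B's foldl with pair state equals passRec
lemma foldB_eq_passRec (cards : List Int) :
    ∀ (d : PySem.Dict Int (List Int)) (out : List Int),
      (cards.foldl (fun (st : PySem.Dict Int (List Int) × List Int) v =>
          match PySem.Dict.get? st.1 v with
          | some (c :: rest) => (st.1.insert v rest, st.2 ++ [c])
          | _ => (st.1, st.2 ++ [v])) (d, out)).2 = out ++ passRec d cards := by
  induction cards with
  | nil => intro d out; simp [passRec]
  | cons v vs ih =>
    intro d out
    cases h : PySem.Dict.get? d v with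
    | none => simp [List.foldl_cons, h, passRec, ih]
    | some q =>
      cases q with
      | nil => simp [List.foldl_cons, h, passRec, ih]
      | cons c rest => simp [List.foldl_cons, h, passRec, ih]

-- ===== VERDICT (by name: the statement is the Claim_ definition above) =====
theorem sort_rcards_spec : Claim_equal_sort_rcards := by
  intro rcards cards _
  unfold Spec_sort_rcards sort_rcards sort_rcards_alt
  rw [foldB_eq_passRec, List.nil_append]
  rw [PySem.List.foldl_congr_mem _
    (fun result c =>
      match PySem.List.index? result (PySem.Int.mod c 1000) with
      | some i => result.set i c
      | none => result)
    (fun r f => replFirst (PySem.Int.mod f 1000) f r) cards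
    (fun acc x _ => stepA_eq_repl acc x)]
  exact (pass_eq_fold cards _ _
    (fun f hf => (List.mem_filter.mp hf).2)
    (fun v => build_getD rcards v)).symm
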